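-- pv_equiv track=rewrite | github.com/dehobbs/ADScan | lib/audit_log.py | _format_severities
-- ===== SOURCE A (Python) =====
-- _SEV_ORDER = ("critical", "high", "medium", "low", "info")
--
-- def _format_severities(counts: dict[str, int]) -> str:
--     if not counts:
--         return "-"
--     parts = []
--     for sev in _SEV_ORDER:
--         if sev in counts:
--             parts.append(f"{sev.upper()[0]}:{counts[sev]}")
--     for sev, cnt in counts.items():
--         if sev not in _SEV_ORDER:
--             parts.append(f"{sev.upper()}:{cnt}")
--     return " ".join(parts) if parts else "-"
-- ===== SOURCE B (Python) =====
-- _SEV_ORDER = ("critical", "high", "medium", "low", "info")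
--
--
-- def _format_severities(counts: dict[str, int]) -> str:
--     if not counts:
--         return "-"
--     rank = {s: i for i, s in enumerate(_SEV_ORDER)}
--     buckets = [[] for _ in range(len(_SEV_ORDER) + 1)]
--     for sev, cnt in counts.items():
--         r = rank.get(sev)
--         if r is None:
--             buckets[len(_SEV_ORDER)].append(f"{sev.upper()}:{cnt}")
--         else:
--             buckets[r].append(f"{sev.upper()[0]}:{cnt}")
--     return " ".join(label for b in buckets for label in b)
-- ===== Notes on version B (the rewrite author's own statement) =====
-- stated objective: alternative
-- what changed: One bucket-distribution pass over the items (rank table -> 6 buckets, then flatten and join) replaces A's scan of _SEV_ORDER with per-severity membership tests and lookups followed by a second pass over the items; Pre_ only excludes association lists with duplicate keys, which do not represent a Python dict.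
import Mathlib
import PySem

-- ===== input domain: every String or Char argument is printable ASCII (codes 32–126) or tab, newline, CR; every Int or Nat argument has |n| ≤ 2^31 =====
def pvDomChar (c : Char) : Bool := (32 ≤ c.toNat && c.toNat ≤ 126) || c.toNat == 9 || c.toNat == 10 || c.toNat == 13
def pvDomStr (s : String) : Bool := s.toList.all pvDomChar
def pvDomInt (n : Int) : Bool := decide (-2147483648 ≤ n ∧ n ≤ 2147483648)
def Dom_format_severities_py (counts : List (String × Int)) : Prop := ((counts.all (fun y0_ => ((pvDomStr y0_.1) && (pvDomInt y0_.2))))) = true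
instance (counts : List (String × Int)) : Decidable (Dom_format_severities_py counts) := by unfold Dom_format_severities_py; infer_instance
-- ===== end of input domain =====

-- B replaces A's severity-order scan (membership test + lookup per severity, then a second pass
-- for unknowns) by a single bucket-distribution pass over the items; same cost class, different traversal.


-- ===== PORT A =====
-- _SEV_ORDER
def sevOrder : List String := ["critical", "high", "medium", "low", "info"]

-- f"{sev.upper()[0]}" (sev.upper()[0] raises only on "", never a key of the literal _SEV_ORDER loop)
def pvUpperFirst (s : String) : String :=
  match PySem.Str.pyGet? (PySem.Str.upper s) 0 with
  | some c => String.ofList [c]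
  | none => ""

-- f"{sev.upper()[0]}:{cnt}" / f"{sev.upper()}:{cnt}"
def pvLabelK (sev : String) (cnt : Int) : String :=
  PySem.Str.join "" [pvUpperFirst sev, ":", PySem.Int.toStr cnt]
def pvLabelU (sev : String) (cnt : Int) : String :=
  PySem.Str.join "" [PySem.Str.upper sev, ":", PySem.Int.toStr cnt]

-- port of A; the dict argument is (PySem.Dict.mk counts); its .items are exactly `counts`,
-- counts[sev] is guarded by `sev in counts`, so getD's default is unreachable
def format_severities_py (counts : List (String × Int)) : String :=
  if counts = [] then "-"
  else
    let d : PySem.Dict String Int := PySem.Dict.mk counts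
    let parts : List String := sevOrder.foldl
      (fun acc sev => if d.contains sev then acc ++ [pvLabelK sev (d.getD sev 0)] else acc) []
    let parts := counts.foldl
      (fun acc p => if sevOrder.contains p.1 then acc else acc ++ [pvLabelU p.1 p.2]) parts
    if parts = [] then "-" else PySem.Str.join " " parts

-- ===== PORT B =====
-- port of B (Source B): rank table, one distribution pass into 6 buckets, flatten, join.
-- rank's values are 0..4, so r.toNat is exact for the list index buckets[r].
def format_severities_py_alt (counts : List (String × Int)) : String :=
  if counts = [] then "-"
  else
    let rank : PySem.Dict String Int :=
      PySem.Dict.ofList ((PySem.List.enumerate sevOrder 0).map (fun p => (p.2, p.1)))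
    let buckets : List (List String) := List.replicate (sevOrder.length + 1) []
    let buckets := counts.foldl
      (fun bs p =>
        match rank.get? p.1 with
        | none => bs.set sevOrder.length ((bs.getD sevOrder.length []) ++ [pvLabelU p.1 p.2])
        | some r => bs.set r.toNat ((bs.getD r.toNat []) ++ [pvLabelK p.1 p.2])) buckets
    PySem.Str.join " " buckets.flatten

-- ===== PRECONDITION & SPEC =====
-- Pre_ excludes association lists with duplicate keys: they do not represent a Python dict
-- (the declared argument type), so A is never called on them.
def Pre_format_severities_py (counts : List (String × Int)) : Prop :=
  (counts.map Prod.fst).Nodup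
instance (counts : List (String × Int)) : Decidable (Pre_format_severities_py counts) := by
  unfold Pre_format_severities_py; infer_instance

def pvWitness_format_severities_py : (List (String × Int)) := [("high", 2), ("wormable", 7)]

def Spec_format_severities_py (counts : List (String × Int)) (out : String) : Prop :=
  out = format_severities_py_alt counts
instance (counts : List (String × Int)) (out : String) : Decidable (Spec_format_severities_py counts out) := by
  unfold Spec_format_severities_py; infer_instance

-- ===== CLAIM (what is proved, stated in full; the proofs are below) =====
def Claim_equal_format_severities_py : Prop := ∀ (counts : List (String × Int)), Dom_format_severities_py counts → Pre_format_severities_py counts → Spec_format_severities_py counts (format_severities_py counts)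

-- ===== LEMMAS AND PROOFS =====

-- the known-severity part of the output for one severity s, and the unknown part, read off `counts`
def kPart (counts : List (String × Int)) (s : String) : List String :=
  (counts.filter (fun p => p.1 == s)).map (fun p => pvLabelK p.1 p.2)
def uPart (counts : List (String × Int)) : List String :=
  (counts.filter (fun p => !sevOrder.contains p.1)).map (fun p => pvLabelU p.1 p.2)

-- the rank table of B's port, under a proof-local name (definitionally the port's term)
def pvRank : PySem.Dict String Int :=
  PySem.Dict.ofList ((PySem.List.enumerate sevOrder 0).map (fun p => (p.2, p.1)))

theorem pvRank_eq : pvRank = PySem.Dict.mk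
    [("critical", 0), ("high", 1), ("medium", 2), ("low", 3), ("info", 4)] := by decide

theorem rank_get (s : String) :
    pvRank.get? s =
      if s = "critical" then some 0 else if s = "high" then some 1 else if s = "medium" then some 2
      else if s = "low" then some 3 else if s = "info" then some 4 else none := by
  by_cases h1 : s = "critical"
  · subst h1; decide
  rw [if_neg h1]
  by_cases h2 : s = "high"
  · subst h2; decide
  rw [if_neg h2]
  by_cases h3 : s = "medium"
  · subst h3; decide
  rw [if_neg h3]
  by_cases h4 : s = "low"
  · subst h4; decide
  rw [if_neg h4]
  by_cases h5 : s = "info"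
  · subst h5; decide
  rw [if_neg h5, pvRank_eq]
  rw [PySem.Dict.get?_mk_cons, PySem.Dict.get?_mk_cons, PySem.Dict.get?_mk_cons,
    PySem.Dict.get?_mk_cons, PySem.Dict.get?_mk_cons]
  simp [beq_iff_eq, Ne.symm h1, Ne.symm h2, Ne.symm h3, Ne.symm h4, Ne.symm h5]
  rfl

theorem filter_key_nil (t : List (String × Int)) (s : String) (h : s ∉ t.map Prod.fst) :
    t.filter (fun p => p.1 == s) = [] := by
  apply List.filter_eq_nil_iff.mpr
  intro p hp
  simp only [beq_iff_eq]
  intro he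
  exact h (he ▸ List.mem_map_of_mem hp)

theorem get?_mk_eq (counts : List (String × Int)) (hnd : (counts.map Prod.fst).Nodup) (s : String) :
    counts.filter (fun p => p.1 == s) =
      (match (PySem.Dict.mk counts).get? s with | some v => [(s, v)] | none => []) := by
  induction counts with
  | nil => rfl
  | cons p t ih =>
    simp only [List.map_cons, List.nodup_cons] at hnd
    rw [show (PySem.Dict.mk (p :: t)) = PySem.Dict.mk ((p.1, p.2) :: t) by rfl,
        PySem.Dict.get?_mk_cons]
    by_cases h : p.1 = s
    · subst h
      simp only [List.filter_cons, beq_self_eq_true, reduceIte, filter_key_nil t p.1 hnd.1]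
    · have hb : (p.1 == s) = false := by simp [h]
      simp only [List.filter_cons, hb, Bool.false_eq_true, reduceIte]
      exact ih hnd.2

theorem known_part (counts : List (String × Int)) (hnd : (counts.map Prod.fst).Nodup) (s : String) :
    (if (PySem.Dict.mk counts).contains s
      then [pvLabelK s ((PySem.Dict.mk counts).getD s 0)] else []) = kPart counts s := by
  unfold kPart
  rw [get?_mk_eq counts hnd s, PySem.Dict.contains_eq_isSome_get?, PySem.Dict.getD_eq_get?_getD]
  cases h : (PySem.Dict.mk counts).get? s <;> simp

theorem loop2_eq (counts : List (String × Int)) (acc : List String) :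
    counts.foldl (fun acc p => if sevOrder.contains p.1 then acc else acc ++ [pvLabelU p.1 p.2]) acc
      = acc ++ uPart counts := by
  induction counts generalizing acc with
  | nil => simp [uPart]
  | cons p t ih =>
    rw [List.foldl_cons, ih]
    by_cases h : p.1 ∈ sevOrder
    · simp [uPart, h]
    · simp [uPart, h]

-- the distribution pass of B, characterised
theorem fold_buckets (counts : List (String × Int)) (b0 b1 b2 b3 b4 b5 : List String) :
    counts.foldl
      (fun bs p =>
        match pvRank.get? p.1 with
        | none => bs.set sevOrder.length ((bs.getD sevOrder.length []) ++ [pvLabelU p.1 p.2])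
        | some r => bs.set r.toNat ((bs.getD r.toNat []) ++ [pvLabelK p.1 p.2]))
      [b0, b1, b2, b3, b4, b5] =
    [b0 ++ kPart counts "critical", b1 ++ kPart counts "high", b2 ++ kPart counts "medium",
     b3 ++ kPart counts "low", b4 ++ kPart counts "info", b5 ++ uPart counts] := by
  induction counts generalizing b0 b1 b2 b3 b4 b5 with
  | nil => simp [kPart, uPart]
  | cons p t ih =>
    obtain ⟨ps, pc⟩ := p
    simp only [List.foldl_cons]
    simp only [List.getD] at ih ⊢
    by_cases h1 : ps = "critical"
    · subst h1
      rw [show pvRank.get? "critical" = some 0 from by decide]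
      simp only [Int.toNat_zero, List.set, List.getElem?_cons_zero, Option.getD_some]
      rw [ih]
      simp [kPart, uPart, sevOrder]
    by_cases h2 : ps = "high"
    · subst h2
      rw [show pvRank.get? "high" = some 1 from by decide]
      simp only [Int.toNat_one, List.set, List.getElem?_cons_succ,
        List.getElem?_cons_zero, Option.getD_some]
      rw [ih]
      simp [kPart, uPart, sevOrder]
    by_cases h3 : ps = "medium"
    · subst h3
      rw [show pvRank.get? "medium" = some 2 from by decide]
      simp only [show ((2 : Int)).toNat = 2 from rfl, List.set,
        List.getElem?_cons_succ, List.getElem?_cons_zero, Option.getD_some]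
      rw [ih]
      simp [kPart, uPart, sevOrder]
    by_cases h4 : ps = "low"
    · subst h4
      rw [show pvRank.get? "low" = some 3 from by decide]
      simp only [show ((3 : Int)).toNat = 3 from rfl, List.set,
        List.getElem?_cons_succ, List.getElem?_cons_zero, Option.getD_some]
      rw [ih]
      simp [kPart, uPart, sevOrder]
    by_cases h5 : ps = "info"
    · subst h5
      rw [show pvRank.get? "info" = some 4 from by decide]
      simp only [show ((4 : Int)).toNat = 4 from rfl, List.set,
        List.getElem?_cons_succ, List.getElem?_cons_zero, Option.getD_some]
      rw [ih]
      simp [kPart, uPart, sevOrder]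
    · have hr : pvRank.get? ps = none := by
        rw [rank_get]
        simp [h1, h2, h3, h4, h5]
      rw [hr]
      rw [show [b0, b1, b2, b3, b4, b5].set sevOrder.length
          (([b0, b1, b2, b3, b4, b5])[sevOrder.length]?.getD [] ++ [pvLabelU ps pc])
          = [b0, b1, b2, b3, b4, b5 ++ [pvLabelU ps pc]] from rfl]
      rw [ih]
      have hm : ¬ ps ∈ sevOrder := by simp [sevOrder, h1, h2, h3, h4, h5]
      simp [kPart, uPart, h1, h2, h3, h4, h5, hm]

theorem if_append {c : Prop} [Decidable c] (acc l : List String) :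
    (if c then acc ++ l else acc) = acc ++ (if c then l else []) := by
  split <;> simp

theorem parts_ne (counts : List (String × Int)) (h : counts ≠ []) :
    kPart counts "critical" ++ (kPart counts "high" ++ (kPart counts "medium" ++
      (kPart counts "low" ++ (kPart counts "info" ++ uPart counts)))) ≠ [] := by
  obtain ⟨p, t, rfl⟩ := List.exists_cons_of_ne_nil h
  intro hc
  simp only [List.append_eq_nil_iff] at hc
  obtain ⟨hc1, hc2, hc3, hc4, hc5, hc6⟩ := hc
  by_cases hm : p.1 ∈ sevOrder
  · simp only [sevOrder, List.mem_cons, List.not_mem_nil, or_false] at hm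
    rcases hm with h | h | h | h | h <;> simp_all [kPart]
  · simp [uPart, hm] at hc6

theorem format_severities_py_spec : Claim_equal_format_severities_py := by
  intro counts _ hpre
  unfold Spec_format_severities_py format_severities_py format_severities_py_alt
  by_cases hc : counts = []
  · simp [hc]
  · simp only [if_neg hc]
    simp only [show (PySem.Dict.ofList ((PySem.List.enumerate sevOrder 0).map
      (fun p => (p.2, p.1)))) = pvRank from rfl]
    rw [show (List.replicate (sevOrder.length + 1) ([] : List String))
      = [[], [], [], [], [], []] from rfl]
    rw [fold_buckets, loop2_eq]
    simp only [sevOrder, List.foldl_cons, List.foldl_nil]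
    simp only [if_append]
    simp only [known_part counts hpre]
    simp only [List.nil_append, List.append_assoc]
    rw [if_neg (parts_ne counts hc)]
    simp [List.flatten]
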